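-- pv_equiv track=rewrite | github.com/rohan47/learning_ai | adhd-focus-hub/backend/crew/tools/focus_tools.py | _create_distraction_plan
-- ===== SOURCE A (Python) =====
-- from typing import Dict, Any, List, Type
--
-- def _create_distraction_plan(distractions: List[str]) -> Dict[str, str]:
--     """Create strategies for managing specific distractions."""
--     plans = {}
--
--     for distraction in distractions:
--         if "social media" in distraction.lower() or "phone" in distraction.lower():
--             plans[distraction] = "Use app blockers or place device in another room"
--         elif "noise" in distraction.lower() or "sound" in distraction.lower():
--             plans[distraction] = "Use noise-canceling headphones or white noise"
--         elif "email" in distraction.lower():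
--             plans[distraction] = "Close email client and set specific check times"
--         elif "people" in distraction.lower() or "family" in distraction.lower():
--             plans[distraction] = "Use 'Do Not Disturb' signals and communicate focus time"
--         else:
--             plans[distraction] = "Acknowledge the thought and gently redirect to task"
--
--     return plans
-- ===== SOURCE B (Python) =====
-- from typing import Dict, List
--
-- _RULES = [
--     (("social media", "phone"), "Use app blockers or place device in another room"),
--     (("noise", "sound"), "Use noise-canceling headphones or white noise"),
--     (("email",), "Close email client and set specific check times"),
--     (("people", "family"), "Use 'Do Not Disturb' signals and communicate focus time"),
-- ]
-- _DEFAULT = "Acknowledge the thought and gently redirect to task"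
--
-- def _create_distraction_plan(distractions: List[str]) -> Dict[str, str]:
--     """Create strategies for managing specific distractions."""
--     # Stage 1: every distraction starts with the default strategy (fixes key order).
--     plans = {}
--     for d in distractions:
--         plans[d] = _DEFAULT
--     # Stage 2: sweep the rules from lowest to highest priority, overwriting matches,
--     # so the last write for each distraction is its highest-priority matching rule.
--     for keywords, strategy in reversed(_RULES):
--         for d in distractions:
--             if any(k in d.lower() for k in keywords):
--                 plans[d] = strategy
--     return plans
-- ===== Notes on version B (the rewrite author's own statement) =====
-- stated objective: alternative
-- what changed: Inverted the loop nesting: instead of classifying each distraction with a first-match chain, B first assigns every distraction the default, then sweeps the rule table in reverse priority order over all distractions, overwriting matches so the highest-priority rule wins by last-write.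
import Mathlib
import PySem

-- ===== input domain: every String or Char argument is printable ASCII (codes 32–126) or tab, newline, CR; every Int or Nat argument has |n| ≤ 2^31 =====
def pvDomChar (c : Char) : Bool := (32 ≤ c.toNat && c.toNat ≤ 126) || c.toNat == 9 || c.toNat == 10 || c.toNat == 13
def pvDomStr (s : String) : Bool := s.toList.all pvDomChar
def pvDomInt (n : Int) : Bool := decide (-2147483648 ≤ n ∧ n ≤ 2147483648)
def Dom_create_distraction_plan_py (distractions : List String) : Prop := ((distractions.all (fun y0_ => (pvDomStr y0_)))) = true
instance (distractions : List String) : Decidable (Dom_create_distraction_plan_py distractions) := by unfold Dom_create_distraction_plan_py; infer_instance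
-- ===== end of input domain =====

-- B inverts the loop nesting: default-initialise all keys, then sweep the rule table in
-- reverse priority order over all distractions, overwriting so the highest-priority
-- matching rule wins by last-write (objective: alternative; same return value).

-- ===== PORT A =====
def create_distraction_plan_py (distractions : List String) : List (String × String) :=
  (distractions.foldl (fun plans distraction =>
    if PySem.Str.isIn "social media" (PySem.Str.lower distraction)
        || PySem.Str.isIn "phone" (PySem.Str.lower distraction) then
      plans.insert distraction "Use app blockers or place device in another room"
    else if PySem.Str.isIn "noise" (PySem.Str.lower distraction)
        || PySem.Str.isIn "sound" (PySem.Str.lower distraction) then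
      plans.insert distraction "Use noise-canceling headphones or white noise"
    else if PySem.Str.isIn "email" (PySem.Str.lower distraction) then
      plans.insert distraction "Close email client and set specific check times"
    else if PySem.Str.isIn "people" (PySem.Str.lower distraction)
        || PySem.Str.isIn "family" (PySem.Str.lower distraction) then
      plans.insert distraction "Use 'Do Not Disturb' signals and communicate focus time"
    else
      plans.insert distraction "Acknowledge the thought and gently redirect to task"
    ) (PySem.Dict.empty : PySem.Dict String String)).items

-- ===== PORT B =====
def pvRules : List (List String × String) :=
  [ (["social media", "phone"], "Use app blockers or place device in another room"),
    (["noise", "sound"], "Use noise-canceling headphones or white noise"),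
    (["email"], "Close email client and set specific check times"),
    (["people", "family"], "Use 'Do Not Disturb' signals and communicate focus time") ]

def pvDefault : String := "Acknowledge the thought and gently redirect to task"

def create_distraction_plan_py_alt (distractions : List String) : List (String × String) :=
  -- Stage 1: every distraction mapped to the default (fixes key order).
  let plans0 := distractions.foldl
    (fun plans d => plans.insert d pvDefault)
    (PySem.Dict.empty : PySem.Dict String String)
  -- Stage 2: rules from lowest to highest priority, overwriting matches.
  (pvRules.reverse.foldl (fun plans r =>
      distractions.foldl (fun plans d =>
        if r.1.any (fun k => PySem.Str.isIn k (PySem.Str.lower d)) then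
          plans.insert d r.2
        else plans) plans)
    plans0).items

-- ===== PRECONDITION & SPEC =====
def Spec_create_distraction_plan_py (distractions : List String) (out : List (String × String)) : Prop := out = create_distraction_plan_py_alt distractions
instance (distractions : List String) (out : List (String × String)) : Decidable (Spec_create_distraction_plan_py distractions out) := by unfold Spec_create_distraction_plan_py; infer_instance

-- ===== CLAIM (what is proved, stated in full; the proofs are below) =====
def Claim_equal_create_distraction_plan_py : Prop := ∀ (distractions : List String), Dom_create_distraction_plan_py distractions → Spec_create_distraction_plan_py distractions (create_distraction_plan_py distractions)

-- ===== LEMMAS AND PROOFS =====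

-- A's per-string classification (the elif chain), as a function of the string.
def pvChain (d : String) : String :=
  if PySem.Str.isIn "social media" (PySem.Str.lower d)
      || PySem.Str.isIn "phone" (PySem.Str.lower d) then
    "Use app blockers or place device in another room"
  else if PySem.Str.isIn "noise" (PySem.Str.lower d)
      || PySem.Str.isIn "sound" (PySem.Str.lower d) then
    "Use noise-canceling headphones or white noise"
  else if PySem.Str.isIn "email" (PySem.Str.lower d) then
    "Close email client and set specific check times"
  else if PySem.Str.isIn "people" (PySem.Str.lower d)
      || PySem.Str.isIn "family" (PySem.Str.lower d) then
    "Use 'Do Not Disturb' signals and communicate focus time"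
  else
    "Acknowledge the thought and gently redirect to task"

-- lookup after a fold of inserts whose value depends only on the key
theorem getD_foldl_insertf (f : String → String) (l : List String)
    (d : PySem.Dict String String) (k v0 : String) :
    (l.foldl (fun p x => p.insert x (f x)) d).getD k v0 =
      if k ∈ l then f k else d.getD k v0 := by
  induction l generalizing d with
  | nil => simp
  | cons a l ih =>
    simp only [List.foldl_cons, ih, List.mem_cons, PySem.Dict.getD_insert]
    by_cases hl : k ∈ l <;> by_cases ha : k = a <;> simp [hl, ha]

-- lookup after a conditional-insert sweep with a fixed value
theorem getD_foldl_condInsert (c : String → Bool) (s : String) (l : List String)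
    (d : PySem.Dict String String) (k v0 : String) :
    (l.foldl (fun p x => if c x then p.insert x s else p) d).getD k v0 =
      if k ∈ l ∧ c k = true then s else d.getD k v0 := by
  induction l generalizing d with
  | nil => simp
  | cons a l ih =>
    simp only [List.foldl_cons, ih, List.mem_cons]
    by_cases hl : k ∈ l ∧ c k = true
    · simp [hl]
    · by_cases ha : k = a
      · subst ha
        by_cases hc : c k = true <;> simp [hc]
      · have hna : ¬ ((k = a ∨ k ∈ l) ∧ c k = true) := by
          intro h; rcases h with ⟨h1 | h2, hck⟩
          · exact ha h1
          · exact hl ⟨h2, hck⟩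
        by_cases hc : c a = true <;>
          simp [hc, hl, PySem.Dict.getD_insert, ha]

-- a conditional-insert sweep over keys the dict already contains keeps the key list
theorem keys_foldl_condInsert (c : String → Bool) (s : String) (l : List String)
    (d : PySem.Dict String String) (h : ∀ x ∈ l, d.contains x = true) :
    (l.foldl (fun p x => if c x then p.insert x s else p) d).keys = d.keys := by
  induction l generalizing d with
  | nil => simp
  | cons a l ih =>
    simp only [List.foldl_cons]
    by_cases hc : c a = true
    · have hca : d.contains a = true := h a (by simp)
      have hkeys : (d.insert a s).keys = d.keys :=
        PySem.Dict.keys_insert_of_contains d s hca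
      rw [hc]
      simp only [if_true]
      rw [ih (d.insert a s) ?_, hkeys]
      intro x hx
      rw [PySem.Dict.contains_insert]
      simp [h x (List.mem_cons_of_mem _ hx)]
    · simp only [hc]
      exact ih d (fun x hx => h x (List.mem_cons_of_mem _ hx))


-- first matching rule's strategy (proof-only helper)
def pvFM : List (List String × String) → String → Option String
  | [], _ => none
  | r :: rs, k => if r.1.any (fun w => PySem.Str.isIn w (PySem.Str.lower k)) then some r.2 else pvFM rs k

theorem pvFM_append (xs ys : List (List String × String)) (k : String) :
    pvFM (xs ++ ys) k = if (pvFM xs k).isSome then pvFM xs k else pvFM ys k := by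
  induction xs with
  | nil => simp [pvFM]
  | cons r rs ih =>
    simp only [List.cons_append, pvFM, ih]
    split_ifs <;> simp_all

-- the reverse-priority sweep keeps the key list when every key is already present
theorem sweep_keys (rs : List (List String × String)) (l : List String)
    (p : PySem.Dict String String) (hp : ∀ x ∈ l, p.contains x = true) :
    (rs.foldl (fun plans r =>
        l.foldl (fun plans d =>
          if r.1.any (fun k => PySem.Str.isIn k (PySem.Str.lower d)) then
            plans.insert d r.2 else plans) plans) p).keys = p.keys := by
  induction rs generalizing p with
  | nil => rfl
  | cons r rest ih =>
    simp only [List.foldl_cons]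
    have hk := keys_foldl_condInsert
      (fun d => r.1.any (fun k => PySem.Str.isIn k (PySem.Str.lower d))) r.2 l p hp
    rw [ih _ ?_, hk]
    intro x hx
    rw [PySem.Dict.contains_iff_mem_keys, hk, ← PySem.Dict.contains_iff_mem_keys]
    exact hp x hx

-- after the sweep, a key of l holds the strategy of its highest-priority matching rule
theorem sweep_getD (rs : List (List String × String)) (l : List String)
    (p : PySem.Dict String String) (k v0 : String) (hk : k ∈ l) :
    (rs.foldl (fun plans r =>
        l.foldl (fun plans d =>
          if r.1.any (fun k => PySem.Str.isIn k (PySem.Str.lower d)) then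
            plans.insert d r.2 else plans) plans) p).getD k v0 =
      (pvFM rs.reverse k).getD (p.getD k v0) := by
  induction rs generalizing p with
  | nil => simp [pvFM]
  | cons r rest ih =>
    simp only [List.foldl_cons, List.reverse_cons]
    rw [ih, pvFM_append]
    rw [getD_foldl_condInsert]
    cases hfm : pvFM rest.reverse k with
    | some v => simp
    | none =>
      simp only [pvFM, hk, true_and]
      split_ifs <;> simp_all

-- on any single string, the rule table picks exactly what A's elif chain picks
theorem pvFM_eq_chain (k : String) :
    (pvFM pvRules k).getD pvDefault = pvChain k := by
  simp only [pvRules, pvFM, pvChain, pvDefault, List.any_cons, List.any_nil, Bool.or_false]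
  split_ifs <;> rfl

-- ===== VERDICT (by name: the statement is the Claim_ definition above) =====
theorem create_distraction_plan_py_spec : Claim_equal_create_distraction_plan_py := by
  intro distractions _
  unfold Spec_create_distraction_plan_py create_distraction_plan_py create_distraction_plan_py_alt
  have hA : (distractions.foldl (fun plans distraction =>
      if PySem.Str.isIn "social media" (PySem.Str.lower distraction)
          || PySem.Str.isIn "phone" (PySem.Str.lower distraction) then
        plans.insert distraction "Use app blockers or place device in another room"
      else if PySem.Str.isIn "noise" (PySem.Str.lower distraction)
          || PySem.Str.isIn "sound" (PySem.Str.lower distraction) then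
        plans.insert distraction "Use noise-canceling headphones or white noise"
      else if PySem.Str.isIn "email" (PySem.Str.lower distraction) then
        plans.insert distraction "Close email client and set specific check times"
      else if PySem.Str.isIn "people" (PySem.Str.lower distraction)
          || PySem.Str.isIn "family" (PySem.Str.lower distraction) then
        plans.insert distraction "Use 'Do Not Disturb' signals and communicate focus time"
      else
        plans.insert distraction "Acknowledge the thought and gently redirect to task"
      ) (PySem.Dict.empty : PySem.Dict String String))
      = distractions.foldl (fun p x => p.insert x (pvChain x))
          (PySem.Dict.empty : PySem.Dict String String) := by
    congr 1
    funext p x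
    unfold pvChain
    split_ifs <;> rfl
  rw [hA]
  set A := distractions.foldl (fun p x => p.insert x (pvChain x))
      (PySem.Dict.empty : PySem.Dict String String) with hAdef
  set P0 := distractions.foldl (fun plans d => plans.insert d pvDefault)
      (PySem.Dict.empty : PySem.Dict String String) with hP0def
  have hkA : A.keys = PySem.Set.ofList distractions := by
    rw [hAdef, PySem.Dict.keys_foldl_insert distractions (fun _ x => pvChain x)]
    simp [PySem.Set.update_nil_left]
  have hk0 : P0.keys = PySem.Set.ofList distractions := by
    rw [hP0def, PySem.Dict.keys_foldl_insert distractions (fun _ _ => pvDefault)]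
    simp [PySem.Set.update_nil_left]
  have hcont0 : ∀ x ∈ distractions, P0.contains x = true := by
    intro x hx
    rw [PySem.Dict.contains_iff_mem_keys, hk0, PySem.Set.mem_ofList]
    exact hx
  set B := pvRules.reverse.foldl (fun plans r =>
      distractions.foldl (fun plans d =>
        if r.1.any (fun k => PySem.Str.isIn k (PySem.Str.lower d)) then
          plans.insert d r.2 else plans) plans) P0 with hBdef
  have hkB : B.keys = PySem.Set.ofList distractions := by
    rw [hBdef, sweep_keys _ _ _ hcont0, hk0]
  have hndA : A.keys.Nodup := by
    rw [hAdef]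
    exact PySem.Dict.nodup_keys_foldl_insert distractions (fun _ x => pvChain x) _
      (by simp)
  have hndB : B.keys.Nodup := by
    rw [hkB]; exact PySem.Set.nodup_ofList distractions
  rw [PySem.Dict.items_eq_map_keys A hndA "", PySem.Dict.items_eq_map_keys B hndB "",
    hkA, hkB]
  apply List.map_congr_left
  intro k hkmem
  have hk : k ∈ distractions := (PySem.Set.mem_ofList _ _).mp hkmem
  have hgA : A.getD k "" = pvChain k := by
    rw [hAdef, getD_foldl_insertf]
    simp [hk]
  have hgB : B.getD k "" = pvChain k := by
    have hg0 : P0.getD k "" = pvDefault := by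
      rw [hP0def, getD_foldl_insertf (fun _ => pvDefault)]
      simp [hk]
    rw [hBdef, sweep_getD _ _ _ _ _ hk, List.reverse_reverse, hg0, pvFM_eq_chain]
  rw [hgA, hgB]
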